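-- pv_equiv track=rewrite | github.com/ThomasCZhang/CMU-02604-Bioinformatics-Spring2023 | Week11 (Burrows Wheeler)/PartialSuffixArray.py | PartialSuffixArray
-- ===== SOURCE A (Python) =====
-- def PartialSuffixArray(s: str, k: int) -> dict[int, int]:
--     """
--     Generates a partial suffix array. Keeps every k'th element of the suffix array.
--     Input:
--         s: The word to create a partial suffix array of.
--         k: The increment size for which elements of the suffix array to keep.
--     Output:
--         The partial suffix array as a list of integers.
--     """
--     suffixes = [(i,s[i:]) for i in range(len(s))]
--     suffixes = sorted(suffixes, key=lambda x: x[1])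
--     indexes = [x[0] for x in suffixes]
--     suffix_dict = {}
--     for i, j in enumerate(indexes):
--         if j%k == 0:
--             suffix_dict[i] = j
--     return suffix_dict
-- ===== SOURCE B (Python) =====
-- def PartialSuffixArray(s: str, k: int) -> dict[int, int]:
--     """Partial suffix array by rank counting: the position of suffix i in the
--     suffix array is the number of suffixes lexicographically smaller than it,
--     so no global sort of all n suffixes is needed - only the kept entries are
--     ordered at the end."""
--     n = len(s)
--     pairs = [(sum(s[j:] < s[i:] for j in range(n)), i) for i in range(n) if i % k == 0]
--     pairs.sort(key=lambda p: p[0])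
--     return dict(pairs)
-- ===== Notes on version B (the rewrite author's own statement) =====
-- stated objective: alternative
-- what changed: Instead of materialising and comparison-sorting all n (index, suffix) pairs and filtering the sorted order, B computes each kept suffix's position directly as its rank (the count of lexicographically smaller suffixes) and only orders the kept entries.
import Mathlib
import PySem

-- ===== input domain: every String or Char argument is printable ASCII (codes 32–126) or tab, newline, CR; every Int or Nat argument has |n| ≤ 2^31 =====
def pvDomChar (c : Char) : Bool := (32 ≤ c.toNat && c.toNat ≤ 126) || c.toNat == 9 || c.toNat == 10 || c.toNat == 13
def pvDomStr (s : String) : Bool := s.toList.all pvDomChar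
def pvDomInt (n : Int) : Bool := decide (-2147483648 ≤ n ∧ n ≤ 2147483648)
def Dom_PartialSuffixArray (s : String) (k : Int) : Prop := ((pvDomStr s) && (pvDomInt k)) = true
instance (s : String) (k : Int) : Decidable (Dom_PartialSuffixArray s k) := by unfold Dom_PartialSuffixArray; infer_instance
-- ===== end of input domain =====

-- B replaces the global sort of all suffixes by direct rank counting; equivalence of return values is proved below.

-- ===== PORT A =====
def PartialSuffixArray (s : String) (k : Int) : List (Int × Int) :=
  let cs := s.toList
  let suffixes : List (Int × List Char) :=
    (PySem.List.pyRange 0 (cs.length : Int)).map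
      (fun i => (i, PySem.List.slice cs (some i) none))
  let suffixes := PySem.List.sorted suffixes (fun x => x.2)
  let indexes := suffixes.map (fun x => x.1)
  let d := (PySem.List.enumerate indexes).foldl
    (fun (d : PySem.Dict Int Int) ij =>
      if PySem.Int.mod ij.2 k == 0 then d.insert ij.1 ij.2 else d)
    PySem.Dict.empty
  d.items

-- ===== PORT B =====
def PartialSuffixArray_alt (s : String) (k : Int) : List (Int × Int) :=
  let cs := s.toList
  let n := cs.length
  let pairs : List (Int × Int) :=
    (List.range n).filterMap (fun i : Nat =>
      if PySem.Int.mod (i : Int) k == 0 then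
        some ((((List.range n).countP
                 (fun j : Nat => PySem.List.slice cs (some (j : Int)) none <
                           PySem.List.slice cs (some (i : Int)) none) : Nat) : Int),
              (i : Int))
      else none)
  let pairs := PySem.List.sorted pairs (fun p => p.1)
  (PySem.Dict.ofList pairs).items

-- ===== PRECONDITION & SPEC =====
-- Pre_ excludes exactly the inputs where Python A raises ZeroDivisionError: k = 0 with a nonempty s
-- (with s empty the loop body never runs, so k = 0 is fine there).
def Pre_PartialSuffixArray (s : String) (k : Int) : Prop := s.toList = [] ∨ k ≠ 0
instance (s : String) (k : Int) : Decidable (Pre_PartialSuffixArray s k) := by unfold Pre_PartialSuffixArray; infer_instance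
def pvWitness_PartialSuffixArray : String × Int := ("banana", 2)

def Spec_PartialSuffixArray (s : String) (k : Int) (out : List (Int × Int)) : Prop := out = PartialSuffixArray_alt s k
instance (s : String) (k : Int) (out : List (Int × Int)) : Decidable (Spec_PartialSuffixArray s k out) := by unfold Spec_PartialSuffixArray; infer_instance

-- ===== CLAIM (what is proved, stated in full; the proofs are below) =====
def Claim_equal_PartialSuffixArray : Prop := ∀ (s : String) (k : Int), Dom_PartialSuffixArray s k → Pre_PartialSuffixArray s k → Spec_PartialSuffixArray s k (PartialSuffixArray s k)

-- ===== LEMMAS AND PROOFS =====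

-- rank of suffix i: number of lexicographically smaller suffixes
def pvRank (cs : List Char) (i : Nat) : Nat :=
  (List.range cs.length).countP (fun j => decide (cs.drop j < cs.drop i))

theorem pv_enum (xs : List Int) : ∀ (c : Int),
    PySem.List.enumerate xs c = (List.range xs.length).map (fun r : Nat => ((c + (r : Int) : Int), xs.getD r 0)) := by
  induction xs with
  | nil => intro c; simp [PySem.List.enumerate]
  | cons x t ih =>
    intro c
    simp only [PySem.List.enumerate, List.length_cons, List.range_succ_eq_map, List.map_cons,
      List.map_map, ih (c + 1)]
    congr 1
    · simp
    · apply List.map_congr_left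
      intro r _
      simp only [Function.comp_apply, List.getD_cons_succ]
      congr 1
      push_cast; ring

theorem pv_contains_insert (d : PySem.Dict Int Int) (a b : Int) (v : Int)
    (h : (d.insert a v).contains b = true) : d.contains b = true ∨ b = a := by
  simp only [PySem.Dict.insert, PySem.Dict.contains] at h ⊢
  by_cases ha : (d.items.any fun p => p.1 == a) = true
  · rw [if_pos ha] at h
    simp only [List.any_map, List.any_eq_true, Function.comp_apply] at h
    obtain ⟨p, hp, hpb⟩ := h
    by_cases hpa : (p.1 == a) = true
    · rw [if_pos hpa] at hpb
      right; simp only [beq_iff_eq] at hpb; omega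
    · rw [if_neg hpa] at hpb
      left; exact List.any_eq_true.mpr ⟨p, hp, hpb⟩
  · rw [if_neg ha] at h
    simp only [List.any_append, List.any_cons, List.any_nil, Bool.or_eq_true] at h
    rcases h with h | h
    · left; exact h
    · right
      rcases h with h | h
      · simp only [beq_iff_eq] at h; omega
      · simp at h

theorem pv_fold_items (c : Int × Int → Bool) : ∀ (L : List (Int × Int)) (d : PySem.Dict Int Int),
    (L.map Prod.fst).Nodup → (∀ p ∈ L, d.contains p.1 = false) →
    (L.foldl (fun d ij => if c ij then d.insert ij.1 ij.2 else d) d).items = d.items ++ L.filter c := by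
  intro L
  induction L with
  | nil => intro d _ _; simp
  | cons p t ih =>
    intro d hnd hfresh
    have hpd : d.contains p.1 = false := hfresh p (by simp)
    have hins : (d.insert p.1 p.2).items = d.items ++ [p] := by
      simp [PySem.Dict.insert, hpd]
    rw [List.map_cons, List.nodup_cons] at hnd
    obtain ⟨hnd1, hnd2⟩ := hnd
    have hfresh' : ∀ q ∈ t, (d.insert p.1 p.2).contains q.1 = false := by
      intro q hq
      have hqd : d.contains q.1 = false := hfresh q (by simp [hq])
      have hne : q.1 ≠ p.1 := by
        intro h; exact hnd1 (h ▸ List.mem_map_of_mem hq)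
      by_contra hcon
      have : (d.insert p.1 p.2).contains q.1 = true := by simpa using hcon
      rcases pv_contains_insert d p.1 q.1 p.2 this with h | h
      · rw [hqd] at h; exact Bool.false_ne_true h
      · exact hne h
    by_cases hc : c p = true
    · simp only [List.foldl_cons, hc, if_true]
      rw [ih (d.insert p.1 p.2) hnd2 hfresh']
      simp [hins, List.filter_cons, hc]
    · have hc' : c p = false := by simpa using hc
      simp only [List.foldl_cons, hc', Bool.false_eq_true, if_false]
      rw [ih d hnd2 (fun q hq => hfresh q (by simp [hq]))]
      simp [List.filter_cons, hc']

theorem pv_count_sorted {α κ : Type} [LinearOrder κ] (key : α → κ) :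
    ∀ (ys : List α), ys.Pairwise (fun a b => key a < key b) →
      ∀ r (h : r < ys.length), ys.countP (fun p => decide (key p < key (ys[r]'h))) = r := by
  intro ys
  induction ys with
  | nil => intro _ r h; simp at h
  | cons y t ih =>
    intro hpw r h
    have hy : ∀ b ∈ t, key y < key b := by
      intro b hb; exact (List.pairwise_cons.mp hpw).1 b hb
    have hpt : t.Pairwise (fun a b => key a < key b) := (List.pairwise_cons.mp hpw).2
    match r with
    | 0 =>
      rw [List.countP_eq_zero]
      intro b hb
      simp only [List.getElem_cons_zero, decide_eq_true_eq]
      rcases List.mem_cons.mp hb with rfl | hb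
      · exact lt_irrefl _
      · exact not_lt.mpr (hy b hb).le
    | r + 1 =>
      have ht : r < t.length := by simpa using h
      simp only [List.getElem_cons_succ, List.countP_cons]
      have hlt : key y < key (t[r]'ht) := hy _ (List.getElem_mem ht)
      simp only [hlt, decide_true, if_true]
      exact congrArg (· + 1) (ih hpt r ht)

theorem pv_sorted_inst {α κ : Type} [LinearOrder κ] (d1 : DecidableLT κ)
    (xs ys : List α) (key : α → κ) (hperm : ys.Perm xs)
    (hpw : List.Pairwise (fun a b => key a < key b) ys) :
    @PySem.List.sorted α κ _ d1 xs key false = ys := by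
  rw [Subsingleton.elim d1 (@LinearOrder.toDecidableLT κ _)]
  exact PySem.List.sorted_eq_of_perm_of_pairwise_lt xs ys key hperm hpw

theorem pv_filter_map {α β : Type} (p : α → Bool) (f : α → β) : ∀ (l : List α),
    (l.filter p).map f = l.filterMap (fun a => if p a then some (f a) else none) := by
  intro l
  induction l with
  | nil => simp
  | cons x t ih =>
    by_cases hx : p x = true
    · simp [List.filter_cons, List.filterMap_cons, hx, ih]
    · have hx' : p x = false := by simpa using hx
      simp [List.filter_cons, List.filterMap_cons, hx', ih]

theorem pv_filterMap_index {α β : Type} [Inhabited α] (g : α → Option β) : ∀ (l : List α),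
    l.filterMap g = (List.range l.length).filterMap (fun r => g (l.getD r default)) := by
  intro l
  induction l with
  | nil => simp
  | cons x t ih =>
    simp only [List.filterMap_cons, List.length_cons, List.range_succ_eq_map,
      List.filterMap_cons, List.getD_cons_zero, List.filterMap_map]
    have htail : (List.filterMap ((fun r => g ((x :: t).getD r default)) ∘ Nat.succ) (List.range t.length))
        = t.filterMap g := by
      rw [ih]
      apply List.filterMap_congr
      intro r _
      simp [List.getD_cons_succ]
    cases hgx : g x with
    | none => simpa [hgx] using htail.symm
    | some b => simpa [hgx] using htail.symm

theorem pv_update_items : ∀ (L : List (Int × Int)) (d : PySem.Dict Int Int),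
    (L.map Prod.fst).Nodup → (∀ p ∈ L, d.contains p.1 = false) →
    (PySem.Dict.update d L).items = d.items ++ L := by
  intro L
  induction L with
  | nil => intro d _ _; simp [PySem.Dict.update]
  | cons p t ih =>
    intro d hnd hfresh
    have hpd : d.contains p.1 = false := hfresh p (by simp)
    have hins : (d.insert p.1 p.2).items = d.items ++ [p] := by
      simp [PySem.Dict.insert, hpd]
    rw [List.map_cons, List.nodup_cons] at hnd
    obtain ⟨hnd1, hnd2⟩ := hnd
    have hfresh' : ∀ q ∈ t, (d.insert p.1 p.2).contains q.1 = false := by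
      intro q hq
      have hqd : d.contains q.1 = false := hfresh q (by simp [hq])
      have hne : q.1 ≠ p.1 := by
        intro hEq; exact hnd1 (hEq ▸ List.mem_map_of_mem hq)
      by_contra hcon
      have : (d.insert p.1 p.2).contains q.1 = true := by simpa using hcon
      rcases pv_contains_insert d p.1 q.1 p.2 this with hcase | hcase
      · rw [hqd] at hcase; exact Bool.false_ne_true hcase
      · exact hne hcase
    have : PySem.Dict.update d (p :: t) = PySem.Dict.update (d.insert p.1 p.2) t := by
      simp [PySem.Dict.update]
    rw [this, ih (d.insert p.1 p.2) hnd2 hfresh', hins]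
    simp

-- main proof
set_option maxHeartbeats 1000000 in
theorem pv_main (s : String) (k : Int) :
    PartialSuffixArray s k = PartialSuffixArray_alt s k := by
  unfold PartialSuffixArray PartialSuffixArray_alt
  simp only []
  set cs := s.toList with hcs
  set n := cs.length with hn
  -- normalise A's suffix list
  have hP : (PySem.List.pyRange 0 (n : Int)).map
      (fun i => (i, PySem.List.slice cs (some i) none))
      = (List.range n).map (fun i : Nat => ((i : Int), cs.drop i)) := by
    rw [PySem.List.pyRange_zero_natCast, List.map_map]
    apply List.map_congr_left
    intro i _
    simp [Function.comp, PySem.List.slice_from cs (by positivity : (0:Int) ≤ (i:Int))]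
  rw [hP]
  set P := (List.range n).map (fun i : Nat => ((i : Int), cs.drop i)) with hPdef
  set T := PySem.List.sorted P (fun x => x.2) with hTdef
  have hTP : T.Perm P := PySem.List.sorted_perm P (fun x => x.2) false
  have hlenT : T.length = n := by
    rw [hTP.length_eq, hPdef]; simp
  -- injectivity of suffixes
  have hinj : ∀ i j : Nat, i < n → j < n → cs.drop i = cs.drop j → i = j := by
    intro i j hi hj hd
    have := congrArg List.length hd
    simp only [List.length_drop] at this
    omega
  have hPnodup : (P.map (fun p => p.2)).Nodup := by
    rw [hPdef, List.map_map]
    refine List.Nodup.map_on ?_ List.nodup_range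
    intro i hi j hj hd
    exact hinj i j (List.mem_range.mp hi) (List.mem_range.mp hj) (by simpa using hd)
  have hTnodup : (T.map (fun p => p.2)).Nodup := ((hTP.map (fun p => p.2)).nodup_iff).mpr hPnodup
  have hTpw : T.Pairwise (fun a b => a.2 < b.2) := by
    have hle : T.Pairwise (fun a b => a.2 ≤ b.2) := by
      rw [hTdef, show PySem.List.sorted P (fun x => x.2)
          = @PySem.List.sorted _ _ _ (@LinearOrder.toDecidableLT (List Char) List.instLinearOrder)
              P (fun x => x.2) false from by
        rw [show (fun (a b : List Char) => a.decidableLT b)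
            = (@LinearOrder.toDecidableLT (List Char) List.instLinearOrder) from Subsingleton.elim _ _]]
      exact PySem.List.sorted_pairwise P (fun x => x.2)
    have hne : T.Pairwise (fun a b => a.2 ≠ b.2) := by
      have := hTnodup
      rw [List.Nodup, List.pairwise_map] at this
      exact this
    exact (hle.and hne).imp (fun h => lt_of_le_of_ne h.1 h.2)
  have hrank := pv_count_sorted (fun p : Int × List Char => p.2) T hTpw
  -- members of T
  have hmem : ∀ r (h : r < T.length), ∃ i : Nat, i < n ∧ T[r]'h = ((i : Int), cs.drop i) := by
    intro r h
    have : T[r]'h ∈ P := hTP.mem_iff.mp (List.getElem_mem h)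
    rw [hPdef] at this
    obtain ⟨i, hi, hEq⟩ := List.mem_map.mp this
    exact ⟨i, List.mem_range.mp hi, hEq.symm⟩
  set indexes := T.map (fun x => x.1) with hIdef
  set c : Int × Int → Bool := fun ij => PySem.Int.mod ij.2 k == 0 with hcdef
  set h : Nat → Option (Int × Int) := fun r =>
    if PySem.Int.mod (indexes.getD r 0) k == 0 then some ((r : Int), indexes.getD r 0) else none with hhdef
  set g : Nat → Option (Int × Int) := fun i =>
    if PySem.Int.mod (i : Int) k == 0 then some ((pvRank cs i : Int), (i : Int)) else none with hgdef
  -- A's output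
  have hlenI : indexes.length = n := by rw [hIdef]; simpa using hlenT
  have hE : PySem.List.enumerate indexes 0
      = (List.range n).map (fun r : Nat => ((r : Int), indexes.getD r 0)) := by
    rw [pv_enum indexes 0, hlenI]
    apply List.map_congr_left
    intro r _
    simp
  have hEnodup : (((List.range n).map (fun r : Nat => ((r : Int), indexes.getD r 0))).map Prod.fst).Nodup := by
    rw [List.map_map]
    refine List.Nodup.map_on ?_ List.nodup_range
    intro i _ j _ hd
    simpa using hd
  have hA : (List.foldl (fun (d : PySem.Dict Int Int) ij =>
        if PySem.Int.mod ij.2 k == 0 then d.insert ij.1 ij.2 else d)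
        PySem.Dict.empty (PySem.List.enumerate indexes 0)).items
      = (List.range n).filterMap h := by
    rw [hE]
    rw [pv_fold_items c _ PySem.Dict.empty hEnodup
      (by intro p _; simp [PySem.Dict.contains, PySem.Dict.empty])]
    rw [List.filter_map, pv_filter_map]
    simp only [PySem.Dict.empty]
    rfl
  rw [hA]
  -- slice → drop
  have hslice : ∀ (m : Nat), PySem.List.slice cs (some (m : Int)) none = cs.drop m := by
    intro m
    rw [PySem.List.slice_from cs (by positivity)]
    simp
  -- B's pair list is (range n).filterMap g
  have hBp : (List.range n).filterMap (fun i : Nat =>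
      if PySem.Int.mod (i : Int) k == 0 then
        some ((((List.range n).countP
                 (fun j : Nat => decide (PySem.List.slice cs (some (j : Int)) none <
                           PySem.List.slice cs (some (i : Int)) none)) : Nat) : Int),
              (i : Int))
      else none) = (List.range n).filterMap g := by
    apply List.filterMap_congr
    intro i _
    rw [hgdef]
    simp only [hslice, pvRank, ← hn]
  rw [hBp]
  set Bp := (List.range n).filterMap g with hBpdef
  set A_list := (List.range n).filterMap h with hAdef
  -- A_list is strictly increasing in the first component
  have hpwA : A_list.Pairwise (fun a b => a.1 < b.1) := by
    rw [hAdef]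
    rw [List.pairwise_filterMap]
    apply List.Pairwise.imp_of_mem ?_ (List.pairwise_lt_range)
    intro a b _ _ hab
    intro x hx y hy
    simp only [hhdef] at hx hy
    split at hx
    · split at hy
      · cases hx; cases hy
        have : (a : Int) < (b : Int) := by exact_mod_cast hab
        simpa using this
      · simp at hy
    · simp at hx
  -- pointwise: the r-th entry of the sorted suffix array has rank r
  have hpoint : ∀ r ∈ List.range n, g ((T.map (fun p => p.1.toNat)).getD r 0) = h r := by
    intro r hr
    have hrT : r < T.length := by rw [hlenT]; exact List.mem_range.mp hr
    obtain ⟨i, hi, hTi⟩ := hmem r hrT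
    have hids : (T.map (fun p => p.1.toNat)).getD r 0 = i := by
      rw [List.getD_eq_getElem _ _ (by simpa using hrT), List.getElem_map, hTi]
      simp
    have hidx : indexes.getD r 0 = (i : Int) := by
      rw [hIdef, List.getD_eq_getElem _ _ (by simpa using hrT), List.getElem_map, hTi]
    have hrk : pvRank cs i = r := by
      have h1 : pvRank cs i = P.countP (fun p => decide (p.2 < cs.drop i)) := by
        rw [pvRank, hPdef, List.countP_map]
        rfl
      have h2 : P.countP (fun p => decide (p.2 < cs.drop i))
          = T.countP (fun p => decide (p.2 < cs.drop i)) := (hTP.countP_eq _).symm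
      have h3 : T.countP (fun p => decide (p.2 < cs.drop i))
          = T.countP (fun p => decide (p.2 < (T[r]'hrT).2)) := by
        apply List.countP_congr
        intro p _
        rw [hTi]
      have h4 := hrank r hrT
      beta_reduce at h4
      have h5 : T.countP (fun p => decide (p.2 < (T[r]'hrT).2))
          = List.countP (fun p => @decide (p.2 < (T[r]'hrT).2)
              (@LinearOrder.toDecidableLT _ List.instLinearOrder p.2 (T[r]'hrT).2)) T := by
        apply List.countP_congr
        intro p _
        simp [decide_eq_decide]
      omega
    rw [hids]
    show (if PySem.Int.mod (i : Int) k == 0 then some ((pvRank cs i : Int), (i : Int)) else none)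
       = (if PySem.Int.mod (indexes.getD r 0) k == 0 then some ((r : Int), indexes.getD r 0) else none)
    rw [hidx, hrk]
  have hperm : A_list.Perm Bp := by
    have hidsperm : (T.map (fun p => p.1.toNat)).Perm (List.range n) := by
      have h1 := hTP.map (fun p => p.1.toNat)
      have h2 : P.map (fun p => p.1.toNat) = List.range n := by
        rw [hPdef, List.map_map]
        have : ((fun p : Int × List Char => p.1.toNat) ∘ fun i : Nat => ((i : Int), cs.drop i)) = id := by
          funext i; simp
        rw [this, List.map_id]
      rwa [h2] at h1
    have h3 : (T.map (fun p => p.1.toNat)).filterMap g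
        = (List.range n).filterMap (fun r => g ((T.map (fun p => p.1.toNat)).getD r 0)) := by
      have := pv_filterMap_index g (T.map (fun p => p.1.toNat))
      rwa [List.length_map, hlenT] at this
    have h4 : (List.range n).filterMap (fun r => g ((T.map (fun p => p.1.toNat)).getD r 0))
        = A_list := by
      rw [hAdef]
      exact List.filterMap_congr hpoint
    have h5 : A_list = (T.map (fun p => p.1.toNat)).filterMap g := by rw [h3, h4]
    have h6 : ((T.map (fun p => p.1.toNat)).filterMap g).Perm Bp := by
      rw [hBpdef]; exact hidsperm.filterMap g
    exact h5 ▸ h6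
  -- B's sort returns exactly A_list
  have hsort : PySem.List.sorted Bp (fun p : Int × Int => p.1) = A_list :=
    pv_sorted_inst _ Bp A_list (fun p => p.1) hperm hpwA
  rw [hsort]
  -- feeding A_list through dict() returns it unchanged
  have hAnodup : (A_list.map Prod.fst).Nodup := by
    rw [List.Nodup, List.pairwise_map]
    exact hpwA.imp ne_of_lt
  rw [PySem.Dict.ofList, pv_update_items A_list PySem.Dict.empty hAnodup
    (by intro p _; simp [PySem.Dict.contains, PySem.Dict.empty])]
  simp [PySem.Dict.empty]
-- ===== VERDICT (by name: the statement is the Claim_ definition above) =====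
theorem PartialSuffixArray_spec : Claim_equal_PartialSuffixArray := by
  intro s k _ _
  unfold Spec_PartialSuffixArray
  exact pv_main s k
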